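-- pv_equiv track=rewrite | github.com/LeBlue/cmcumgr-client | tests/generator/smp_serial_create.py | sixteen
-- ===== SOURCE A (Python) =====
-- def sixteen(data):
--     """\
--     yield tuples of hex and ASCII display in multiples of 16. Includes a
--     space after 8 bytes and (None, None) after 16 bytes and at the end.
--     """
--     n = 0
--     for bi in data:
--         b = bytes(bytearray([bi]))
--
--         yield ('{:02x} '.format(ord(b)), b.decode('ascii') if b' ' <= b < b'\x7f' else '.')
--         n += 1
--         if n == 8:
--             yield (' ', '')
--         elif n >= 16:
--             yield (None, None)
--             n = 0
--     if n > 0: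
--         while n < 16:
--             n += 1
--             if n == 8:
--                 yield (' ', '')
--             yield ('   ', ' ')
--         yield (None, None)
-- ===== SOURCE B (Python) =====
-- def _row(row):
--     """format one row of 1..16 bytes: per-byte tuples, the (' ', '') separator
--     after position 8, padding up to 16 positions, and a trailing (None, None)."""
--     out = []
--     for i, bi in enumerate(row):
--         out.append(('{:02x} '.format(bi), chr(bi) if 32 <= bi < 127 else '.'))
--         if i == 7:
--             out.append((' ', ''))
--     for i in range(len(row), 16):
--         if i == 7:
--             out.append((' ', ''))
--         out.append(('   ', ' '))
--     out.append((None, None))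
--     return out
--
--
-- def sixteen(data):
--     buf = []
--     for bi in data:
--         buf.append(bi)
--         if len(buf) == 16:
--             yield from _row(buf)
--             buf = []
--     if buf:
--         yield from _row(buf)
-- ===== Notes on version B (the rewrite author's own statement) =====
-- stated objective: alternative
-- what changed: Replaces A's single loop with an inline position counter, inline separator/row-break emission and a separate tail padding while-loop by an accumulate-into-16-byte-buffer loop that flushes each (possibly partial) row through one row-formatter helper.
import Mathlib
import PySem

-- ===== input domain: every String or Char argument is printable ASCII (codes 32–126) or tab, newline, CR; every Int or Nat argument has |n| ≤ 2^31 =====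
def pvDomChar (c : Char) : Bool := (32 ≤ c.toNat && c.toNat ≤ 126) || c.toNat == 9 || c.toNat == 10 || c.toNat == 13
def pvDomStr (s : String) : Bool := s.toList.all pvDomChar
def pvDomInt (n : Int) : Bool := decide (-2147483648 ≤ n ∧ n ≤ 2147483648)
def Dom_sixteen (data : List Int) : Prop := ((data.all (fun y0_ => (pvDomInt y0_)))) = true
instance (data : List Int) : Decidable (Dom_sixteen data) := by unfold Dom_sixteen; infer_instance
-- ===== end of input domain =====

-- B restructures A's counter-with-inline-separators loop into an accumulate-a-16-byte-buffer
-- loop flushed through a single row-formatter (objective: alternative decomposition, same cost).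

-- shared byte-formatting helpers (both Pythons call '{:02x} '.format and the same printable test);
-- exact for 0 ≤ bi ≤ 255, which Pre_sixteen guarantees
def hexDigit (d : Nat) : Char := if d < 10 then Char.ofNat (48 + d) else Char.ofNat (87 + d)
def fmtHex (bi : Int) : String := String.mk [hexDigit (bi.toNat / 16), hexDigit (bi.toNat % 16), ' ']
def asciiOf (bi : Int) : String := if 32 ≤ bi ∧ bi < 127 then String.mk [Char.ofNat bi.toNat] else "."

-- ===== PORT A =====
-- A's tail 'while n < 16' loop; it runs at most 16 iterations, so fuel 16 makes it exact
def sixteenPad : Nat → Nat → List (Option String × Option String)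
  | _, 0 => [(none, none)]
  | n, fuel+1 =>
    if n < 16 then
      (if n + 1 = 8 then [(some " ", some "")] else []) ++
        (some "   ", some " ") :: sixteenPad (n + 1) fuel
    else [(none, none)]

-- A's main 'for bi in data' loop with its counter n
def sixteenLoop : Nat → List Int → List (Option String × Option String)
  | n, [] => if n > 0 then sixteenPad n 16 else []
  | n, bi :: rest =>
    (some (fmtHex bi), some (asciiOf bi)) ::
      (if n + 1 = 8 then (some " ", some "") :: sixteenLoop (n + 1) rest
       else if n + 1 ≥ 16 then (none, none) :: sixteenLoop 0 rest
       else sixteenLoop (n + 1) rest)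

def sixteen (data : List Int) : List (Option String × Option String) :=
  sixteenLoop 0 data

-- ===== PORT B =====
-- _row's 'for i, bi in enumerate(row)' loop
def rowData : Nat → List Int → List (Option String × Option String)
  | _, [] => []
  | i, bi :: rest =>
    (some (fmtHex bi), some (asciiOf bi)) ::
      (if i = 7 then (some " ", some "") :: rowData (i + 1) rest
       else rowData (i + 1) rest)

-- _row's 'for i in range(len(row), 16)' padding loop
def rowPad (start : Nat) : List (Option String × Option String) :=
  (PySem.List.pyRange start 16 1).foldl
    (fun acc i =>
      acc ++ (if i = 7 then [(some " ", some "")] else []) ++ [(some "   ", some " ")]) []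

def row (r : List Int) : List (Option String × Option String) :=
  rowData 0 r ++ rowPad r.length ++ [(none, none)]

-- B's main loop: accumulate into buf, flush full rows
def sixteenAltLoop : List Int → List Int → List (Option String × Option String)
  | buf, [] => if buf = [] then [] else row buf
  | buf, bi :: rest =>
    let buf' := buf ++ [bi]
    if buf'.length = 16 then row buf' ++ sixteenAltLoop [] rest
    else sixteenAltLoop buf' rest

def sixteen_alt (data : List Int) : List (Option String × Option String) :=
  sixteenAltLoop [] data

-- ===== PRECONDITION & SPEC =====
-- A raises ValueError (bytes(bytearray([bi]))) whenever some byte is outside 0..255; Pre_ admits exactly the inputs A returns on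
def Pre_sixteen (data : List Int) : Prop := ∀ bi ∈ data, 0 ≤ bi ∧ bi < 256
instance (data : List Int) : Decidable (Pre_sixteen data) := by unfold Pre_sixteen; infer_instance
def pvWitness_sixteen : List Int := [0, 31, 32, 65, 126, 127, 255, 16, 17, 18]

def Spec_sixteen (data : List Int) (out : List (Option String × Option String)) : Prop := out = sixteen_alt data
instance (data : List Int) (out : List (Option String × Option String)) : Decidable (Spec_sixteen data out) := by unfold Spec_sixteen; infer_instance

-- ===== CLAIM (what is proved, stated in full; the proofs are below) =====
def Claim_equal_sixteen : Prop := ∀ (data : List Int), Dom_sixteen data → Pre_sixteen data → Spec_sixteen data (sixteen data)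

-- ===== LEMMAS AND PROOFS =====

-- A's tail padding equals B's padding loop plus the trailing (None, None)
theorem pad_eq (n : Nat) (h : n ≤ 16) :
    sixteenPad n 16 = rowPad n ++ [(none, none)] := by
  interval_cases n <;> decide

theorem rowPad_sixteen : rowPad 16 = [] := by decide

theorem rowData_append (buf : List Int) (i : Nat) (bi : Int) :
    rowData i (buf ++ [bi]) =
      rowData i buf ++ (some (fmtHex bi), some (asciiOf bi)) ::
        (if i + buf.length = 7 then [(some " ", some "")] else []) := by
  induction buf generalizing i with
  | nil => simp [rowData]
  | cons b t ih =>
    simp only [List.cons_append, rowData, ih (i + 1), List.length_cons]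
    split_ifs <;> simp <;> omega

theorem loop_eq (rest buf : List Int) (h : buf.length < 16) :
    rowData 0 buf ++ sixteenLoop buf.length rest = sixteenAltLoop buf rest := by
  induction rest generalizing buf with
  | nil =>
    by_cases hb : buf = []
    · subst hb; simp [sixteenLoop, sixteenAltLoop, rowData]
    · have hlen : 0 < buf.length := List.length_pos_iff.mpr hb
      simp only [sixteenLoop, sixteenAltLoop, if_neg hb, if_pos hlen, row,
        pad_eq buf.length (by omega)]
      simp
  | cons bi rest ih =>
    simp only [sixteenLoop, sixteenAltLoop, List.length_append, List.length_cons,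
      List.length_nil]
    by_cases h8 : buf.length + 1 = 8
    · have h16 : ¬ (buf.length + 1 = 16) := by omega
      rw [if_pos h8, if_neg h16, ← ih (buf ++ [bi]) (by simp; omega),
        rowData_append buf 0 bi, if_pos (by omega : 0 + buf.length = 7)]
      simp
    · by_cases h16 : buf.length + 1 = 16
      · rw [if_neg h8, if_pos (by omega : buf.length + 1 ≥ 16), if_pos h16]
        have := ih ([] : List Int) (by simp)
        simp only [rowData] at this
        rw [← this, row, rowData_append buf 0 bi,
          if_neg (by omega : ¬ (0 + buf.length = 7))]
        simp [rowPad_sixteen, h16]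
      · rw [if_neg h8, if_neg (by omega : ¬ (buf.length + 1 ≥ 16)), if_neg h16,
          ← ih (buf ++ [bi]) (by simp; omega), rowData_append buf 0 bi,
          if_neg (by omega : ¬ (0 + buf.length = 7))]
        simp

-- ===== VERDICT (by name: the statement is the Claim_ definition above) =====
theorem sixteen_spec : Claim_equal_sixteen := by
  intro data _ _
  unfold Spec_sixteen sixteen sixteen_alt
  have := loop_eq data [] (by simp)
  simpa [rowData] using this
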